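-- pv_equiv track=rewrite | github.com/mkern75/EverybodyCodes | TheKingdomOfAlgorithmia2024/q07.py | loop_helper
-- ===== SOURCE A (Python) =====
-- def loop_helper(n_steps, note, track, power_level_initial):
--     total = 0
--     power_level = power_level_initial
--     for i in range(n_steps):
--         c = track[i % len(track)]
--         if c == "+":
--             power_level += 1
--         elif c == "-":
--             power_level -= 1
--         else:
--             if note[i % len(note)] == "+":
--                 power_level += 1
--             elif note[i % len(note)] == "-":
--                 power_level -= 1
--         total += power_level
--     return total, power_level
-- ===== SOURCE B (Python) =====
-- def loop_helper(n_steps, note, track, power_level_initial):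
--     # Closed form over the period L = lcm(len(track), len(note)) (or len(track)
--     # when note is empty, since note is then never usable): one pass over a
--     # single period collects the per-step delta prefix sums, then full cycles
--     # and the remainder are summed arithmetically.
--     if n_steps <= 0:
--         return 0, power_level_initial
--     lt, ln = len(track), len(note)
--     if ln == 0:
--         L = lt
--     else:
--         g, b = lt, ln
--         while b:
--             g, b = b, g % b
--         L = lt * ln // g             # lcm
--     q, r = n_steps // L, n_steps % L
--     prefix = 0                       # S(i+1): sum of deltas of steps 0..i
--     s1 = 0                           # sum of S(k), k = 1..L
--     sr = 0                           # sum of S(k), k = 1..r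
--     pr = 0                           # S(r)
--     for i in range(L):
--         c = track[i % lt]
--         if c == "+":
--             prefix += 1
--         elif c == "-":
--             prefix -= 1
--         elif ln and note[i % ln] == "+":
--             prefix += 1
--         elif ln and note[i % ln] == "-":
--             prefix -= 1
--         s1 += prefix
--         if i < r:
--             sr += prefix
--         if i == r - 1:
--             pr = prefix
--     d_total = prefix                 # S(L): net delta of one full period
--     total = (n_steps * power_level_initial
--              + q * s1
--              + d_total * L * (q * (q - 1) // 2)
--              + q * d_total * r
--              + sr)
--     power = power_level_initial + q * d_total + pr
--     return total, power
-- ===== Notes on version B (the rewrite author's own statement) =====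
-- stated objective: alternative
-- what changed: B replaces the O(n_steps) step-by-step simulation by closed-form arithmetic: one pass over a single period L = lcm(len(track), len(note)) (len(track) when note is empty) collects delta prefix sums, then whole cycles and the remainder are summed with a triangular-number formula (a win only when n_steps greatly exceeds that lcm, which the timing family does not exercise).
import Mathlib
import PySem

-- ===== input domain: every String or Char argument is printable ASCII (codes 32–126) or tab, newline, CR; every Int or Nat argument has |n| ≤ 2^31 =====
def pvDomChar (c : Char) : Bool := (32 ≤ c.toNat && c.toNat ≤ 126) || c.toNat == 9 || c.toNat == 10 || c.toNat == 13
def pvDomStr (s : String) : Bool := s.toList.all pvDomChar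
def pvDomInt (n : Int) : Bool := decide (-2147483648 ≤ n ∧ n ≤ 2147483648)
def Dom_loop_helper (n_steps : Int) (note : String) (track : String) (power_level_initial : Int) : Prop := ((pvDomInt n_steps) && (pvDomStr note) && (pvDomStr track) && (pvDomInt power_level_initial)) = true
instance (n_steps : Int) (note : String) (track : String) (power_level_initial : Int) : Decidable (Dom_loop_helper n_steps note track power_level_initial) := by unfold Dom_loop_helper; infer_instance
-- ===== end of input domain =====

-- B replaces A's step-by-step simulation by closed-form arithmetic over the period
-- lcm(len(track), len(note)) (len(track) when note is empty): one period pass, then cycle arithmetic.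


-- ===== PORT A =====
-- Literal port of A: fold over range(n_steps) carrying (total, power_level).
-- The 'none' branches are where Python raises (empty track/note); Pre_ excludes them.
def loop_helper (n_steps : Int) (note : String) (track : String) (power_level_initial : Int) : Int × Int :=
  (PySem.List.pyRange 0 n_steps 1).foldl
    (fun (st : Int × Int) i =>
      let pl := st.2
      let pl' :=
        match PySem.Str.pyGet? track (PySem.Int.mod i (PySem.Str.len track)) with
        | none => pl      -- IndexError/ZeroDivisionError in Python: outside Pre_
        | some c =>
          if c = '+' then pl + 1
          else if c = '-' then pl - 1
          else
            match PySem.Str.pyGet? note (PySem.Int.mod i (PySem.Str.len note)) with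
            | none => pl  -- ZeroDivisionError in Python: outside Pre_
            | some c2 => if c2 = '+' then pl + 1 else if c2 = '-' then pl - 1 else pl
      (st.1 + pl', pl'))
    (0, power_level_initial)

-- ===== PORT B =====
-- Euclid's loop from Source B: 'while b: g, b = b, g % b'
def gcdLoop (g b : Nat) : Nat :=
  if h : b = 0 then g else gcdLoop b (g % b)
decreasing_by exact Nat.mod_lt _ (Nat.pos_of_ne_zero h)

-- Port of Source B: one pass over one period L (= lt when note is empty, else lt*ln // gcd)
-- collecting (prefix = S(i+1), s1 = Σ S(k) for k ≤ L, sr = Σ S(k) for k ≤ r, pr = S(r)),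
-- then the closed form.  Source B's 'i == r - 1' (over ints, i ≥ 0) is 'i + 1 = r' on Nat;
-- Source B's 'q * (q - 1) // 2' equals Nat 'q * (q - 1) / 2' (both are 0 at q = 0);
-- Source B's 'elif ln and …' guard is the 'if ln = 0' branch.
def loop_helper_alt (n_steps : Int) (note : String) (track : String) (power_level_initial : Int) : Int × Int :=
  if n_steps ≤ 0 then (0, power_level_initial)
  else
    let lt := track.toList.length
    let ln := note.toList.length
    let L := if ln = 0 then lt else lt * ln / gcdLoop lt ln
    let n := n_steps.toNat
    let q := n / L
    let r := n % L
    let st :=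
      (List.range L).foldl
        (fun (s : Int × Int × Int × Int) i =>
          let p :=
            match track.toList[i % lt]? with
            | none => s.1
            | some c =>
              if c = '+' then s.1 + 1
              else if c = '-' then s.1 - 1
              else if ln = 0 then s.1
              else
                match note.toList[i % ln]? with
                | none => s.1
                | some c2 => if c2 = '+' then s.1 + 1 else if c2 = '-' then s.1 - 1 else s.1
          (p, s.2.1 + p,
           (if i < r then s.2.2.1 + p else s.2.2.1),
           (if i + 1 = r then p else s.2.2.2)))
        (0, 0, 0, 0)
    (n_steps * power_level_initial + (q : Int) * st.2.1
       + st.1 * (L : Int) * ((q * (q - 1) / 2 : Nat) : Int)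
       + (q : Int) * st.1 * (r : Int) + st.2.2.1,
     power_level_initial + (q : Int) * st.1 + st.2.2.2)

-- ===== PRECONDITION & SPEC =====
-- Pre_ excludes exactly the inputs where Python A raises: n_steps > 0 with an empty
-- track (ZeroDivisionError from i % 0), or with an empty note when some executed
-- track position (a j < min(n_steps, len(track))) is neither '+' nor '-' (then A
-- evaluates note[i % 0] and raises ZeroDivisionError). On every input admitted, A returns.
def Pre_loop_helper (n_steps : Int) (note : String) (track : String) (power_level_initial : Int) : Prop :=
  n_steps ≤ 0 ∨ (track.toList ≠ [] ∧
    (note.toList ≠ [] ∨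
      ∀ j < min n_steps.toNat track.toList.length,
        track.toList[j]? = some '+' ∨ track.toList[j]? = some '-'))
instance (n_steps : Int) (note : String) (track : String) (power_level_initial : Int) : Decidable (Pre_loop_helper n_steps note track power_level_initial) := by unfold Pre_loop_helper; infer_instance

def pvWitness_loop_helper : Int × String × String × Int := (7, "+-=", "++=-", 3)

def Spec_loop_helper (n_steps : Int) (note : String) (track : String) (power_level_initial : Int) (out : Int × Int) : Prop := out = loop_helper_alt n_steps note track power_level_initial
instance (n_steps : Int) (note : String) (track : String) (power_level_initial : Int) (out : Int × Int) : Decidable (Spec_loop_helper n_steps note track power_level_initial out) := by unfold Spec_loop_helper; infer_instance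

-- ===== CLAIM (what is proved, stated in full; the proofs are below) =====
def Claim_equal_loop_helper : Prop := ∀ (n_steps : Int) (note : String) (track : String) (power_level_initial : Int), Dom_loop_helper n_steps note track power_level_initial → Pre_loop_helper n_steps note track power_level_initial → Spec_loop_helper n_steps note track power_level_initial (loop_helper n_steps note track power_level_initial)

-- ===== LEMMAS AND PROOFS =====

-- per-step power delta, as both Pythons compute it (0 where Python A would raise;
-- A's port returns 'pl' there and B's 'if ln = 0' guard yields the same 0 delta)
def pvDelta (tr nt : List Char) (i : Nat) : Int :=
  match tr[i % tr.length]? with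
  | none => 0
  | some c =>
    if c = '+' then 1
    else if c = '-' then -1
    else
      match nt[i % nt.length]? with
      | none => 0
      | some c2 => if c2 = '+' then 1 else if c2 = '-' then -1 else 0

-- S n = sum of deltas of the first n steps (power after n steps = p0 + S n)
def pvS (tr nt : List Char) : Nat → Int
  | 0 => 0
  | n + 1 => pvS tr nt n + pvDelta tr nt n

-- T n = Σ_{k=1..n} S k (total after n steps = n*p0 + T n)
def pvT (tr nt : List Char) : Nat → Int
  | 0 => 0
  | n + 1 => pvT tr nt n + pvS tr nt (n + 1)

theorem pvStepEq (tr nt : List Char) (i : Nat) (pl : Int) :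
    (match tr[i % tr.length]? with
     | none => pl
     | some c =>
       if c = '+' then pl + 1
       else if c = '-' then pl - 1
       else
         match nt[i % nt.length]? with
         | none => pl
         | some c2 => if c2 = '+' then pl + 1 else if c2 = '-' then pl - 1 else pl)
    = pl + pvDelta tr nt i := by
  unfold pvDelta
  rcases tr[i % tr.length]? with _ | c
  · simp
  · simp only []
    split_ifs <;> (try ring) <;>
      (rcases nt[i % nt.length]? with _ | c2
       · simp
       · simp only []; split_ifs <;> ring)

-- B's per-step update ('if ln = 0' guard included) also adds pvDelta
theorem pvStepEqB (tr nt : List Char) (i : Nat) (pl : Int) :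
    (match tr[i % tr.length]? with
     | none => pl
     | some c =>
       if c = '+' then pl + 1
       else if c = '-' then pl - 1
       else if nt.length = 0 then pl
       else
         match nt[i % nt.length]? with
         | none => pl
         | some c2 => if c2 = '+' then pl + 1 else if c2 = '-' then pl - 1 else pl)
    = pl + pvDelta tr nt i := by
  rw [← pvStepEq tr nt i pl]
  rcases tr[i % tr.length]? with _ | c
  · rfl
  · simp only []
    split_ifs with h1 h2 h3
    · rfl
    · rfl
    · have : nt = [] := List.length_eq_zero_iff.mp h3
      subst this; simp
    · rfl

theorem pvAfold (tr nt : List Char) (p0 : Int) (n : Nat) :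
    (List.range n).foldl
      (fun (st : Int × Int) i =>
        let pl' := st.2 + pvDelta tr nt i
        (st.1 + pl', pl'))
      (0, p0)
    = ((n : Int) * p0 + pvT tr nt n, p0 + pvS tr nt n) := by
  induction n with
  | zero => simp [pvT, pvS]
  | succ m ih =>
    rw [List.range_succ, List.foldl_append, ih]
    simp only [List.foldl_cons, List.foldl_nil, pvT, pvS, Prod.mk.injEq]
    constructor <;> (push_cast; ring)

theorem pvBfold (tr nt : List Char) (r m : Nat) :
    (List.range m).foldl
      (fun (s : Int × Int × Int × Int) i =>
        let p := s.1 + pvDelta tr nt i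
        (p, s.2.1 + p,
         (if i < r then s.2.2.1 + p else s.2.2.1),
         (if i + 1 = r then p else s.2.2.2)))
      (0, 0, 0, 0)
    = (pvS tr nt m, pvT tr nt m, pvT tr nt (min m r),
       if r ≤ m then pvS tr nt r else 0) := by
  induction m with
  | zero =>
    simp only [List.range_zero, List.foldl_nil, Nat.zero_min, pvT]
    split_ifs with h
    · have : r = 0 := Nat.le_zero.mp h
      simp [this, pvS]
    · rfl
  | succ m ih =>
    rw [List.range_succ, List.foldl_append, ih]
    simp only [List.foldl_cons, List.foldl_nil]
    have hS : pvS tr nt m + pvDelta tr nt m = pvS tr nt (m + 1) := rfl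
    by_cases hmr : m < r
    · have h1 : min m r = m := by omega
      have h2 : min (m + 1) r = m + 1 := by omega
      by_cases hr1 : m + 1 = r
      · simp only [hS, h1, h2, if_pos hmr, if_pos hr1]
        have : r ≤ m + 1 := by omega
        simp [pvT, this, ← hr1]
      · simp only [hS, h1, h2, if_pos hmr, if_neg hr1]
        have hnot : ¬ r ≤ m := by omega
        have hnot' : ¬ r ≤ m + 1 := by omega
        simp [pvT, hnot, hnot']
    · have h1 : min m r = r := by omega
      have h2 : min (m + 1) r = r := by omega
      have hr1 : ¬ (m + 1 = r) := by omega
      have hle : r ≤ m := by omega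
      have hle' : r ≤ m + 1 := by omega
      simp [hS, h1, h2, hmr, hr1, hle, hle', pvT]

-- periodicity: L a common multiple of the lengths, or note empty (never read)
theorem pvDelta_per (tr nt : List Char) (L : Nat)
    (h1 : tr.length ∣ L) (h2 : nt.length ∣ L ∨ nt = []) (i : Nat) :
    pvDelta tr nt (i + L) = pvDelta tr nt i := by
  obtain ⟨c1, rfl⟩ := h1
  unfold pvDelta
  rw [Nat.add_mul_mod_self_left]
  rcases h2 with ⟨c2, e2⟩ | hnil
  · rw [e2, Nat.add_mul_mod_self_left]
  · subst hnil; simp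

theorem pvS_L_add (tr nt : List Char) (L : Nat)
    (h1 : tr.length ∣ L) (h2 : nt.length ∣ L ∨ nt = []) (a : Nat) :
    pvS tr nt (L + a) = pvS tr nt L + pvS tr nt a := by
  induction a with
  | zero => simp [pvS]
  | succ b ih =>
    have : L + (b + 1) = (L + b) + 1 := by omega
    rw [this]
    show pvS tr nt (L + b) + pvDelta tr nt (L + b) = _
    rw [ih, Nat.add_comm L b, pvDelta_per tr nt L h1 h2 b]
    simp [pvS]; ring

theorem pvT_L_add (tr nt : List Char) (L : Nat)
    (h1 : tr.length ∣ L) (h2 : nt.length ∣ L ∨ nt = []) (a : Nat) :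
    pvT tr nt (L + a) = pvT tr nt L + (a : Int) * pvS tr nt L + pvT tr nt a := by
  induction a with
  | zero => simp [pvT]
  | succ b ih =>
    have e : L + (b + 1) = (L + b) + 1 := by omega
    rw [e]
    show pvT tr nt (L + b) + pvS tr nt ((L + b) + 1) = _
    have e2 : (L + b) + 1 = L + (b + 1) := by omega
    rw [ih, e2, pvS_L_add tr nt L h1 h2 (b + 1)]
    show _ = pvT tr nt L + ((b : Int) + 1) * pvS tr nt L + (pvT tr nt b + pvS tr nt (b + 1))
    ring

theorem pvS_cycles (tr nt : List Char) (L : Nat)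
    (h1 : tr.length ∣ L) (h2 : nt.length ∣ L ∨ nt = []) (q r : Nat) :
    pvS tr nt (q * L + r) = (q : Int) * pvS tr nt L + pvS tr nt r := by
  induction q with
  | zero => simp
  | succ p ih =>
    have e : (p + 1) * L + r = L + (p * L + r) := by ring
    rw [e, pvS_L_add tr nt L h1 h2, ih]
    push_cast; ring

theorem pvTriSucc (q : Nat) : (q + 1) * q / 2 = q * (q - 1) / 2 + q := by
  cases q with
  | zero => rfl
  | succ m =>
    have e : (m + 2) * (m + 1) = (m + 1) * m + (m + 1) * 2 := by ring
    rw [Nat.succ_sub_one]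
    calc (m + 1 + 1) * (m + 1) / 2 = ((m + 1) * m + (m + 1) * 2) / 2 := by rw [← e]
      _ = (m + 1) * m / 2 + (m + 1) := Nat.add_mul_div_right _ _ (by norm_num)

theorem pvT_cycles (tr nt : List Char) (L : Nat)
    (h1 : tr.length ∣ L) (h2 : nt.length ∣ L ∨ nt = []) (q r : Nat) :
    pvT tr nt (q * L + r)
      = (q : Int) * pvT tr nt L
        + pvS tr nt L * (L : Int) * ((q * (q - 1) / 2 : Nat) : Int)
        + (q : Int) * pvS tr nt L * (r : Int) + pvT tr nt r := by
  induction q with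
  | zero => simp
  | succ p ih =>
    have e : (p + 1) * L + r = L + (p * L + r) := by ring
    rw [e, pvT_L_add tr nt L h1 h2, ih]
    simp only [Nat.add_sub_cancel]
    rw [pvTriSucc]
    push_cast; ring

theorem gcdLoop_eq : ∀ b g : Nat, gcdLoop g b = Nat.gcd b g := by
  intro b
  induction b using Nat.strong_induction_on with
  | _ b ih =>
    intro g
    unfold gcdLoop
    split
    · next h => rw [h, Nat.gcd_zero_left]
    · next h =>
      rw [ih (g % b) (Nat.mod_lt _ (Nat.pos_of_ne_zero h)) b]
      exact (Nat.gcd_rec b g).symm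

-- A, in closed form via pvS/pvT (holds on every input of the port)
theorem pvA_closed (n_steps : Int) (note track : String) (p0 : Int) :
    loop_helper n_steps note track p0
      = ((n_steps.toNat : Int) * p0 + pvT track.toList note.toList n_steps.toNat,
         p0 + pvS track.toList note.toList n_steps.toNat) := by
  unfold loop_helper
  rw [PySem.List.pyRange_one, List.foldl_map]
  have e : (n_steps - 0).toNat = n_steps.toNat := by omega
  rw [e, ← pvAfold track.toList note.toList p0 n_steps.toNat]
  apply PySem.List.foldl_congr_mem
  intro st k _
  simp only [zero_add, PySem.Str.len_eq, PySem.Int.mod_natCast, PySem.Str.pyGet?_natCast]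
  rw [pvStepEq track.toList note.toList k st.2]

-- ===== VERDICT (by name: the statement is the Claim_ definition above) =====
theorem loop_helper_spec : Claim_equal_loop_helper := by
  intro n_steps note track p0 _hdom hpre
  unfold Spec_loop_helper
  rw [pvA_closed]
  unfold loop_helper_alt
  by_cases hn : n_steps ≤ 0
  · have : n_steps.toNat = 0 := by omega
    simp [hn, this, pvS, pvT]
  · rcases hpre with h | ⟨htr, _⟩
    · exact absurd h hn
    simp only [if_neg hn]
    have hlt : 0 < track.toList.length := List.length_pos_of_ne_nil htr
    set lt := track.toList.length
    set ln := note.toList.length with hlndef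
    set L := if ln = 0 then lt else lt * ln / gcdLoop lt ln with hLdef
    have hdvd : lt ∣ L ∧ (ln ∣ L ∨ note.toList = []) ∧ 0 < L := by
      by_cases hln0 : ln = 0
      · have : note.toList = [] := List.length_eq_zero_iff.mp hln0
        exact ⟨by simp [hLdef, hln0], Or.inr this, by simp [hLdef, hln0, hlt]⟩
      · have hL : L = Nat.lcm lt ln := by
          rw [hLdef, if_neg hln0, gcdLoop_eq, Nat.gcd_comm]; rfl
        refine ⟨hL ▸ Nat.dvd_lcm_left lt ln, Or.inl (hL ▸ Nat.dvd_lcm_right lt ln), ?_⟩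
        rw [hL]
        exact Nat.pos_of_ne_zero (Nat.lcm_ne_zero (by omega) hln0)
    obtain ⟨h1, h2, hLpos⟩ := hdvd
    set n := n_steps.toNat with hndef
    set q := n / L
    set r := n % L
    have hrL : r < L := Nat.mod_lt _ hLpos
    have hfold :
        (List.range L).foldl
          (fun (s : Int × Int × Int × Int) i =>
            let p :=
              match track.toList[i % lt]? with
              | none => s.1
              | some c =>
                if c = '+' then s.1 + 1
                else if c = '-' then s.1 - 1
                else if ln = 0 then s.1
                else
                  match note.toList[i % ln]? with
                  | none => s.1
                  | some c2 => if c2 = '+' then s.1 + 1 else if c2 = '-' then s.1 - 1 else s.1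
            (p, s.2.1 + p,
             (if i < r then s.2.2.1 + p else s.2.2.1),
             (if i + 1 = r then p else s.2.2.2)))
          (0, 0, 0, 0)
        = (pvS track.toList note.toList L, pvT track.toList note.toList L,
           pvT track.toList note.toList r, pvS track.toList note.toList r) := by
      have := pvBfold track.toList note.toList r L
      rw [min_eq_right (Nat.le_of_lt hrL), if_pos (Nat.le_of_lt hrL)] at this
      rw [← this]
      apply PySem.List.foldl_congr_mem
      intro s i _
      simp only []
      rw [pvStepEqB track.toList note.toList i s.1]
    simp only [hfold]
    have hn' : n_steps = (n : Int) := by omega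
    have hqr : q * L + r = n := by
      rw [Nat.mul_comm]; exact Nat.div_add_mod n L
    rw [hn', ← hqr,
        pvS_cycles track.toList note.toList L h1 h2 q r,
        pvT_cycles track.toList note.toList L h1 h2 q r]
    simp only [Prod.mk.injEq]
    constructor <;> (push_cast; ring)
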